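-- pv_equiv track=rewrite | github.com/deepanshs/csdmpy | csdmpy/units.py | get_start_index_of_quantity_unit
-- ===== SOURCE A (Python) =====
-- NUMERIC = "0123456789-+.eE*/j^ ()"
--
-- def get_start_index_of_quantity_unit(string):
--     """Return the index where the unit of the quantity starts."""
--     string = string.strip() + " "
--
--     for i, c in enumerate(string):
--         if c not in NUMERIC:
--             break
--
--     j = 1
--     for j in range(1, i + 1):
--         if string[:i][-j] == "(":
--             break
--         if string[:i][-j] == ")":
--             j = j - 1
--             break
--
--     index = i if i == j else i - j
--     return index
-- ===== SOURCE B (Python) =====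
-- NUMERIC = "0123456789-+.eE*/j^ ()"
--
-- def get_start_index_of_quantity_unit(string):
--     """Return the index where the unit of the quantity starts: just past the
--     last ')' of the numeric prefix, at its last '(', or at the end of the
--     numeric prefix; -1 signals that the string has no numeric prefix at all."""
--     s = string.strip() + " "
--     boundary = None
--     for end, c in enumerate(s):
--         if c not in NUMERIC:
--             break
--         if c == "(":
--             boundary = end
--         elif c == ")":
--             boundary = end + 1
--     if end == 0:
--         return -1
--     return end if boundary is None else boundary
-- ===== Notes on version B (the rewrite author's own statement) =====
-- stated objective: simpler
-- what changed: A's two staged scans (forward to find the numeric-prefix end, then a backward char-by-char loop over repeated slices string[:i][-j] to locate the last parenthesis) are replaced by one forward pass that tracks the unit boundary in an accumulator while scanning the numeric prefix.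
-- intended difference: On strings whose stripped form starts with '(' and whose numeric prefix contains no further parenthesis, A's i==j collision makes it return the prefix length i, while B returns 0, the actual index of the '(' where the unit starts, consistent with A's own treatment of a last '(' at any other position. — e.g. on get_start_index_of_quantity_unit("("): A returns 1, B returns 0
import Mathlib
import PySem

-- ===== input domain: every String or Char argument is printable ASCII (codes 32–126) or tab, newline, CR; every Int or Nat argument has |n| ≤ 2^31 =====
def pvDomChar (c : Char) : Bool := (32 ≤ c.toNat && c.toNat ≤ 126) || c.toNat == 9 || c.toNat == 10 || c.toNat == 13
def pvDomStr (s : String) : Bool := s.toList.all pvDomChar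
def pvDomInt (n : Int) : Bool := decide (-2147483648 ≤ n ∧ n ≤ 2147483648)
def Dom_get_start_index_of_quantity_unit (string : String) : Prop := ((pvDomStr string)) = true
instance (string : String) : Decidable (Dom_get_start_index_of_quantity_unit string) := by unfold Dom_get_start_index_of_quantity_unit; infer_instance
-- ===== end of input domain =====

-- B replaces A's two staged scans (forward for the prefix end, then a backward slice-based
-- search for the last parenthesis) by ONE forward pass tracking the unit boundary in an
-- accumulator; objective: simpler (one loop, no repeated slicing).

-- ===== PORT A =====
def pvNumeric : List Char := "0123456789-+.eE*/j^ ()".toList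

-- 'for i, c in enumerate(string): if c not in NUMERIC: break' — i keeps the last index if no break
def pvForA : List Char → Nat → Nat
  | [], i => i - 1          -- loop fell off the end: i stays at the last index (list is never empty here)
  | c :: rest, i => if pvNumeric.contains c then pvForA rest (i + 1) else i

-- 'for j in range(1, i+1): if string[:i][-j] == "(": break; if ... == ")": j -= 1; break'
-- sub = string[:i] has length i, so sub[-j] is sub.getD (i - j).
def pvBackAj (sub : List Char) (i j : Nat) : Int :=
  if h : j ≤ i then
    let c := sub.getD (i - j) ' '
    if c = '(' then (j : Int)
    else if c = ')' then (j : Int) - 1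
    else if h2 : j = i then (j : Int) else pvBackAj sub i (j + 1)
  else (j : Int)            -- i = 0: range(1, 1) is empty, j keeps its initial value
termination_by i - j
decreasing_by omega

def get_start_index_of_quantity_unit (string : String) : Int :=
  let s := PySem.Chars.strip string.toList ++ [' ']
  let i := pvForA s 0
  let sub := s.take i
  let j := pvBackAj sub i 1
  if (i : Int) = j then (i : Int) else (i : Int) - j

-- ===== PORT B =====
-- 'for end, c in enumerate(s): if c not in NUMERIC: break; if c == "(": boundary = end; elif c == ")": boundary = end + 1'
def pvScanB : List Char → Nat → Option Int → Nat × Option Int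
  | [], pos, b => (pos - 1, b)          -- loop fell off the end: end keeps the last index
  | c :: rest, pos, b =>
    if !(pvNumeric.contains c) then (pos, b)
    else pvScanB rest (pos + 1)
      (if c = '(' then some (pos : Int) else if c = ')' then some ((pos : Int) + 1) else b)

def get_start_index_of_quantity_unit_alt (string : String) : Int :=
  let s := PySem.Chars.strip string.toList ++ [' ']
  let r := pvScanB s 0 none
  if r.1 = 0 then -1
  else match r.2 with
       | none => (r.1 : Int)
       | some p => p

-- ===== PRECONDITION & SPEC =====
-- On strings whose stripped form starts with '(' and whose NUMERIC prefix contains no further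
-- parenthesis, A's i==j collision makes it return the prefix length i, while B returns 0 — the
-- actual index of that '(' — consistent with A's own treatment of a last '(' at any other position.
def D_get_start_index_of_quantity_unit (string : String) : Prop :=
  (PySem.Chars.strip string.toList ++ [' ']).head? = some '(' ∧
  (((PySem.Chars.strip string.toList ++ [' ']).tail.takeWhile
      (fun c => pvNumeric.contains c)).all (fun c => !(c == '(') && !(c == ')'))) = true
instance (string : String) : Decidable (D_get_start_index_of_quantity_unit string) := by
  unfold D_get_start_index_of_quantity_unit; infer_instance

def Spec_get_start_index_of_quantity_unit (string : String) (out : Int) : Prop :=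
  ¬ D_get_start_index_of_quantity_unit string → out = get_start_index_of_quantity_unit_alt string
instance (string : String) (out : Int) : Decidable (Spec_get_start_index_of_quantity_unit string out) := by
  unfold Spec_get_start_index_of_quantity_unit; infer_instance

def pvDiffWitness_get_start_index_of_quantity_unit : String := "("
def pvDiffWitnessOut_get_start_index_of_quantity_unit : Int × Int := (1, 0)

-- ===== CLAIM (what is proved, stated in full; the proofs are below) =====
def Claim_unchanged_get_start_index_of_quantity_unit : Prop := ∀ (string : String), Dom_get_start_index_of_quantity_unit string → Spec_get_start_index_of_quantity_unit string (get_start_index_of_quantity_unit string)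
def Claim_changed_get_start_index_of_quantity_unit : Prop := Dom_get_start_index_of_quantity_unit (pvDiffWitness_get_start_index_of_quantity_unit) ∧ D_get_start_index_of_quantity_unit (pvDiffWitness_get_start_index_of_quantity_unit) ∧ get_start_index_of_quantity_unit (pvDiffWitness_get_start_index_of_quantity_unit) = pvDiffWitnessOut_get_start_index_of_quantity_unit.1 ∧ get_start_index_of_quantity_unit_alt (pvDiffWitness_get_start_index_of_quantity_unit) = pvDiffWitnessOut_get_start_index_of_quantity_unit.2 ∧ pvDiffWitnessOut_get_start_index_of_quantity_unit.1 ≠ pvDiffWitnessOut_get_start_index_of_quantity_unit.2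
def Claim_exact_get_start_index_of_quantity_unit : Prop := ∀ (string : String), Dom_get_start_index_of_quantity_unit string → D_get_start_index_of_quantity_unit string → get_start_index_of_quantity_unit string ≠ get_start_index_of_quantity_unit_alt string

-- ===== LEMMAS AND PROOFS =====

-- proof-only names for the shared intermediate values (padded string, prefix end, prefix)
def pvS (string : String) : List Char := PySem.Chars.strip string.toList ++ [' ']
def pvI (string : String) : Nat := pvForA (pvS string) 0
def pvSub (string : String) : List Char := (pvS string).take (pvI string)

-- proof-only rightmost-occurrence index (Python rfind), used to state the common normal form
def pvRfind : List Char → Char → Int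
  | [], _ => -1
  | c :: rest, t =>
    if pvRfind rest t ≠ -1 then pvRfind rest t + 1 else if c = t then 0 else -1

def pvKk (string : String) : Int := max (pvRfind (pvSub string) '(') (pvRfind (pvSub string) ')')

-- proof-only boundary accumulator: the state of B's loop restricted to the numeric prefix
def pvBound : List Char → Nat → Option Int → Option Int
  | [], _, b => b
  | c :: r, pos, b =>
    pvBound r (pos + 1) (if c = '(' then some (pos : Int) else if c = ')' then some ((pos : Int) + 1) else b)

theorem pvForA_ge (cs : List Char) : ∀ pos, cs ≠ [] → pos ≤ pvForA cs pos := by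
  induction cs with
  | nil => intro pos h; exact absurd rfl h
  | cons c rest ih =>
    intro pos _
    rw [pvForA]
    by_cases hc : pvNumeric.contains c = true
    · rw [if_pos hc]
      cases rest with
      | nil => simp [pvForA]
      | cons d tl => have := ih (pos + 1) (by simp); omega
    · rw [if_neg hc]

theorem pvForA_le (cs : List Char) : ∀ n, cs ≠ [] → pvForA cs n ≤ n + cs.length - 1 := by
  induction cs with
  | nil => intro n h; exact absurd rfl h
  | cons c rest ih =>
    intro n _
    rw [pvForA]
    by_cases hc : pvNumeric.contains c = true
    · rw [if_pos hc]
      cases rest with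
      | nil => simp [pvForA]
      | cons d tl =>
        have := ih (n + 1) (by simp)
        simp only [List.length_cons] at *
        omega
    · rw [if_neg hc]
      simp

theorem pvRfind_ge (l : List Char) (t : Char) : -1 ≤ pvRfind l t := by
  induction l with
  | nil => simp [pvRfind]
  | cons a l ih =>
    rw [pvRfind]
    by_cases h : pvRfind l t ≠ -1
    · rw [if_pos h]; omega
    · rw [if_neg h]; split_ifs <;> omega

theorem pvRfind_lt (l : List Char) (t : Char) : pvRfind l t < l.length := by
  induction l with
  | nil => simp [pvRfind]
  | cons a l ih =>
    rw [pvRfind]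
    simp only [List.length_cons]
    by_cases h : pvRfind l t ≠ -1
    · rw [if_pos h]; push_cast; omega
    · rw [if_neg h]; split_ifs <;> push_cast <;> omega

theorem pvRfind_concat (l : List Char) (c t : Char) :
    pvRfind (l ++ [c]) t = if c = t then (l.length : Int) else pvRfind l t := by
  induction l with
  | nil => by_cases h : c = t <;> simp [pvRfind, h]
  | cons a l ih =>
    rw [List.cons_append, pvRfind, ih]
    by_cases h : c = t
    · have hl : (l.length : Int) ≠ -1 := by omega
      simp only [if_pos h]
      rw [if_pos hl]
      simp
    · simp only [if_neg h]
      conv_rhs => rw [pvRfind]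

theorem pvRfind_neg (l : List Char) (t : Char) : pvRfind l t = -1 ↔ t ∉ l := by
  induction l with
  | nil => simp [pvRfind]
  | cons a l ih =>
    rw [pvRfind]
    have hge := pvRfind_ge l t
    simp only [List.mem_cons]
    by_cases h : pvRfind l t = -1
    · rw [if_neg (by simpa using h)]
      by_cases ha : a = t
      · rw [if_pos ha]
        constructor
        · intro h0; omega
        · intro hn; exact absurd (Or.inl ha.symm) hn
      · rw [if_neg ha]
        constructor
        · intro _ hor
          rcases hor with h1 | h2
          · exact ha h1.symm
          · exact (ih.mp h) h2
        · intro _; rfl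
    · rw [if_pos h]
      constructor
      · intro h0; omega
      · intro hn; exact absurd (ih.mpr (fun hm => hn (Or.inr hm))) h

theorem pvRfind_getD (l : List Char) (t : Char) (h : pvRfind l t ≠ -1) :
    l.getD (pvRfind l t).toNat ' ' = t := by
  induction l with
  | nil => simp [pvRfind] at h
  | cons a l ih =>
    rw [pvRfind] at h ⊢
    by_cases hr : pvRfind l t ≠ -1
    · rw [if_pos hr] at h ⊢
      have hge : 0 ≤ pvRfind l t := by have := pvRfind_ge l t; omega
      have : (pvRfind l t + 1).toNat = (pvRfind l t).toNat + 1 := by omega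
      rw [this]
      simpa using ih hr
    · rw [if_neg hr] at h ⊢
      by_cases ha : a = t
      · rw [if_pos ha] at h ⊢; simpa using ha
      · rw [if_neg ha] at h; exact absurd rfl h

theorem pvTakeSucc {α : Type} {l : List α} {m : Nat} (h : m < l.length) :
    l.take (m + 1) = l.take m ++ [l[m]] := by
  rw [List.take_add_one, List.getElem?_eq_getElem h]
  rfl

-- the common right-to-left description of A's inner loop (the j it produces)
def pvSpec (pre : List Char) (i : Nat) : Int :=
  if max (pvRfind pre '(') (pvRfind pre ')') = -1 then (i : Int)
  else if pre.getD (max (pvRfind pre '(') (pvRfind pre ')')).toNat ' ' = ')' then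
    (i : Int) - max (pvRfind pre '(') (pvRfind pre ')') - 1
  else (i : Int) - max (pvRfind pre '(') (pvRfind pre ')')

theorem back_eq (sub : List Char) (i : Nat) (hlen : sub.length = i) :
    ∀ j, 1 ≤ j → j ≤ i → pvBackAj sub i j = pvSpec (sub.take (i - j + 1)) i := by
  intro j h1 h2
  induction hj : i - j using Nat.strong_induction_on generalizing j with
  | _ m ih =>
  subst hj
  have hm : i - j < sub.length := by omega
  set c := sub.getD (i - j) ' ' with hcdef
  have hc : sub.take (i - j + 1) = sub.take (i - j) ++ [c] := by
    rw [hcdef, List.getD_eq_getElem sub ' ' hm]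
    exact pvTakeSucc hm
  set pre := sub.take (i - j) with hpre
  have hlentake : pre.length = i - j := by
    simp [hpre, List.length_take]; omega
  have hr1 := pvRfind_concat pre c '('
  have hr2 := pvRfind_concat pre c ')'
  rw [hlentake] at hr1 hr2
  have hlt1 : pvRfind pre '(' < ((i - j : Nat) : Int) := by
    have := pvRfind_lt pre '('; rwa [hlentake] at this
  have hlt2 : pvRfind pre ')' < ((i - j : Nat) : Int) := by
    have := pvRfind_lt pre ')'; rwa [hlentake] at this
  have hg1 := pvRfind_ge pre '('
  have hg2 := pvRfind_ge pre ')'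
  rw [pvBackAj, dif_pos h2]
  by_cases hpar1 : c = '('
  · -- char is '(': loop breaks with j; rightmost paren of the prefix is position i - j
    simp only [← hcdef, if_pos hpar1]
    have e1 : pvRfind (pre ++ [c]) '(' = ((i - j : Nat) : Int) := by
      rw [hr1, if_pos hpar1]
    have e2 : pvRfind (pre ++ [c]) ')' = pvRfind pre ')' := by
      rw [hr2, if_neg (by rw [hpar1]; decide)]
    have hk : max (pvRfind (pre ++ [c]) '(') (pvRfind (pre ++ [c]) ')') = ((i - j : Nat) : Int) := by
      rw [e1, e2]; exact max_eq_left (by omega)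
    rw [pvSpec, hc, hk]
    rw [if_neg (by omega : ¬ ((i - j : Nat) : Int) = -1)]
    have hgetD : (pre ++ [c]).getD ((i - j : Nat) : Int).toNat ' ' = c := by
      simp [Int.toNat_natCast, List.getD_eq_getElem?_getD, hlentake]
    rw [hgetD, if_neg (by rw [hpar1]; decide)]
    omega
  · by_cases hpar2 : c = ')'
    · simp only [← hcdef, if_neg hpar1, if_pos hpar2]
      have e1 : pvRfind (pre ++ [c]) '(' = pvRfind pre '(' := by
        rw [hr1, if_neg hpar1]
      have e2 : pvRfind (pre ++ [c]) ')' = ((i - j : Nat) : Int) := by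
        rw [hr2, if_pos hpar2]
      have hk : max (pvRfind (pre ++ [c]) '(') (pvRfind (pre ++ [c]) ')') = ((i - j : Nat) : Int) := by
        rw [e1, e2]; exact max_eq_right (by omega)
      rw [pvSpec, hc, hk]
      rw [if_neg (by omega : ¬ ((i - j : Nat) : Int) = -1)]
      have hgetD : (pre ++ [c]).getD ((i - j : Nat) : Int).toNat ' ' = c := by
        simp [Int.toNat_natCast, List.getD_eq_getElem?_getD, hlentake]
      rw [hgetD, if_pos hpar2]
      omega
    · simp only [← hcdef, if_neg hpar1, if_neg hpar2]
      have e1 : pvRfind (pre ++ [c]) '(' = pvRfind pre '(' := by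
        rw [hr1, if_neg hpar1]
      have e2 : pvRfind (pre ++ [c]) ')' = pvRfind pre ')' := by
        rw [hr2, if_neg hpar2]
      by_cases hji : j = i
      · rw [dif_pos hji]
        -- i = j: the prefix is the single char c, not a paren, so no paren at all
        have h0 : i - j = 0 := by omega
        have hpre0 : pre = [] := by rw [hpre, h0]; simp
        rw [pvSpec, hc, e1, e2, hpre0]
        rw [show pvRfind [] '(' = -1 from rfl, show pvRfind [] ')' = -1 from rfl]
        norm_num
        exact hji
      · rw [dif_neg hji]
        have := ih (i - (j + 1)) (by omega) (j + 1) (by omega) (by omega) rfl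
        rw [this, show i - (j + 1) + 1 = i - j from by omega]
        rw [pvSpec, pvSpec, hc, e1, e2]
        by_cases hk1 : max (pvRfind pre '(') (pvRfind pre ')') = -1
        · rw [if_pos hk1, if_pos hk1]
        · rw [if_neg hk1, if_neg hk1]
          have hk0 : 0 ≤ max (pvRfind pre '(') (pvRfind pre ')') := by
            rcases max_choice (pvRfind pre '(') (pvRfind pre ')') with h | h <;> rw [h] at hk1 ⊢ <;> omega
          have hklt : max (pvRfind pre '(') (pvRfind pre ')') < ((i - j : Nat) : Int) :=
            max_lt hlt1 hlt2
          have hgetD : (pre ++ [c]).getD (max (pvRfind pre '(') (pvRfind pre ')')).toNat ' '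
              = pre.getD (max (pvRfind pre '(') (pvRfind pre ')')).toNat ' ' := by
            have hlt : (max (pvRfind pre '(') (pvRfind pre ')')).toNat < pre.length := by
              rw [hlentake]; omega
            simp [List.getD_eq_getElem?_getD, List.getElem?_append_left hlt]
          rw [hgetD]

theorem pvS_ne (string : String) : pvS string ≠ [] := by simp [pvS]

theorem pvS_last (string : String) : (pvS string).getLast? = some ' ' := by
  rw [pvS, List.getLast?_append]
  rfl

theorem pvSub_len (string : String) : (pvSub string).length = pvI string := by
  have hsne := pvS_ne string
  have hslen : 1 ≤ (pvS string).length := by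
    cases hcs : pvS string with
    | nil => exact absurd hcs hsne
    | cons a l => simp
  have hile : pvI string ≤ (pvS string).length - 1 := by
    have := pvForA_le (pvS string) 0 hsne
    rw [pvI]
    omega
  rw [pvSub]
  simp [List.length_take]
  omega

-- A's value in the common normal form (prefix end pvI, rightmost parenthesis index pvKk)
theorem A_eq (string : String) :
    get_start_index_of_quantity_unit string =
      (if pvKk string = -1 then (if pvI string = 0 then -1 else (pvI string : Int))
       else if (pvSub string).getD (pvKk string).toNat ' ' = ')' then pvKk string + 1
       else if pvKk string = 0 then (pvI string : Int) else pvKk string) := by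
  rw [get_start_index_of_quantity_unit]
  rw [show PySem.Chars.strip string.toList ++ [' '] = pvS string from rfl]
  rw [show pvForA (pvS string) 0 = pvI string from rfl]
  rw [show (pvS string).take (pvI string) = pvSub string from rfl]
  have hlensub := pvSub_len string
  by_cases hi0 : pvI string = 0
  · -- empty numeric prefix: A's inner loop never runs, j = 1, result 0 - 1 = -1
    rw [pvBackAj, dif_neg (by omega : ¬ 1 ≤ pvI string)]
    have hsub0 : pvSub string = [] := by
      have := pvSub_len string
      rw [hi0] at this
      exact List.eq_nil_of_length_eq_zero this
    have hkm : pvKk string = -1 := by rw [pvKk, hsub0]; rfl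
    rw [hkm, hi0, if_pos rfl, if_pos rfl]
    norm_num
  · rw [back_eq (pvSub string) (pvI string) hlensub 1 le_rfl (by omega)]
    have : pvI string - 1 + 1 = pvI string := by omega
    rw [this, show (pvSub string).take (pvI string) = pvSub string from by
      rw [← hlensub]; exact List.take_length]
    rw [pvSpec]
    rw [show max (pvRfind (pvSub string) '(') (pvRfind (pvSub string) ')') = pvKk string from rfl]
    have hklt : pvKk string < (pvI string : Int) := by
      have h1 := pvRfind_lt (pvSub string) '('
      have h2 := pvRfind_lt (pvSub string) ')'
      rw [hlensub] at h1 h2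
      exact max_lt h1 h2
    by_cases hk1 : pvKk string = -1
    · rw [if_pos hk1, if_pos hk1, if_pos rfl, if_neg hi0]
    · have hk0 : 0 ≤ pvKk string := by
        have g1 := pvRfind_ge (pvSub string) '('
        have : -1 ≤ pvKk string := le_max_of_le_left g1
        omega
      rw [if_neg hk1, if_neg hk1]
      by_cases hpar : (pvSub string).getD (pvKk string).toNat ' ' = ')'
      · rw [if_pos hpar, if_pos hpar,
          if_neg (by omega : ¬ (pvI string : Int) = (pvI string : Int) - pvKk string - 1)]
        omega
      · rw [if_neg hpar, if_neg hpar]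
        by_cases hkz : pvKk string = 0
        · rw [hkz]
          simp
        · rw [if_neg hkz,
            if_neg (by omega : ¬ (pvI string : Int) = (pvI string : Int) - pvKk string)]
          omega

-- B's loop splits into the prefix-end scan plus the boundary accumulator over the prefix
theorem scan_decomp (cs : List Char) : ∀ (pos : Nat) (b : Option Int), cs.getLast? = some ' ' →
    pvScanB cs pos b = (pvForA cs pos, pvBound (cs.take (pvForA cs pos - pos)) pos b) := by
  induction cs with
  | nil => intro pos b h; simp at h
  | cons c rest ih =>
    intro pos b hlast
    rw [pvScanB, pvForA]
    by_cases hc : pvNumeric.contains c = true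
    · rw [if_neg (by simpa using hc), if_pos hc]
      cases rest with
      | nil =>
        have hcsp : c = ' ' := by simpa using hlast
        rw [pvForA]
        simp [pvScanB, pvBound, hcsp]
      | cons d tl =>
        have hlast' : (d :: tl).getLast? = some ' ' := by
          rwa [List.getLast?_cons_cons] at hlast
        rw [ih (pos + 1) _ hlast']
        have hge : pos + 1 ≤ pvForA (d :: tl) (pos + 1) := pvForA_ge _ _ (by simp)
        have htk : (c :: d :: tl).take (pvForA (d :: tl) (pos + 1) - pos)
            = c :: (d :: tl).take (pvForA (d :: tl) (pos + 1) - (pos + 1)) := by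
          have : pvForA (d :: tl) (pos + 1) - pos
              = (pvForA (d :: tl) (pos + 1) - (pos + 1)) + 1 := by omega
          rw [this, List.take_succ_cons]
        rw [htk, pvBound]
    · rw [if_pos (by simpa using hc), if_neg hc]
      simp [pvBound]

theorem pvBound_concat (pre : List Char) : ∀ (c : Char) (pos : Nat) (b : Option Int),
    pvBound (pre ++ [c]) pos b =
      (if c = '(' then some ((pos + pre.length : Nat) : Int)
       else if c = ')' then some (((pos + pre.length : Nat) : Int) + 1)
       else pvBound pre pos b) := by
  induction pre with
  | nil => intro c pos b; simp [pvBound]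
  | cons a r ih =>
    intro c pos b
    rw [List.cons_append, pvBound, ih, pvBound]
    have : pos + 1 + r.length = pos + (a :: r).length := by simp; omega
    rw [this]

-- the accumulator over the whole prefix equals the rightmost-parenthesis description
theorem bound_eq_rfind (pre : List Char) :
    pvBound pre 0 none =
      (if max (pvRfind pre '(') (pvRfind pre ')') = -1 then none
       else if pre.getD (max (pvRfind pre '(') (pvRfind pre ')')).toNat ' ' = ')' then
         some (max (pvRfind pre '(') (pvRfind pre ')') + 1)
       else some (max (pvRfind pre '(') (pvRfind pre ')'))) := by
  induction pre using List.reverseRecOn with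
  | nil => simp [pvBound, pvRfind]
  | append_singleton l c ih =>
    rw [pvBound_concat, pvRfind_concat, pvRfind_concat]
    simp only [Nat.zero_add]
    have hlt1 := pvRfind_lt l '('
    have hlt2 := pvRfind_lt l ')'
    have hg1 := pvRfind_ge l '('
    have hg2 := pvRfind_ge l ')'
    by_cases h1 : c = '('
    · subst h1
      rw [if_pos rfl, if_pos rfl, if_neg (by decide : ¬ ('(' = ')'))]
      have hk : max ((l.length : Int)) (pvRfind l ')') = (l.length : Int) :=
        max_eq_left (by omega)
      rw [hk]
      rw [if_neg (by omega : ¬ (l.length : Int) = -1)]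
      have hgetD : (l ++ ['(']).getD ((l.length : Int)).toNat ' ' = '(' := by
        simp [Int.toNat_natCast, List.getD_eq_getElem?_getD]
      rw [hgetD, if_neg (by decide : ¬ ('(' = ')'))]
    · by_cases h2 : c = ')'
      · subst h2
        rw [if_neg (by decide : ¬ (')' = '(')), if_neg (by decide : ¬ (')' = '(')),
          if_pos rfl, if_pos rfl]
        have hk : max (pvRfind l '(') ((l.length : Int)) = (l.length : Int) :=
          max_eq_right (by omega)
        rw [hk]
        rw [if_neg (by omega : ¬ (l.length : Int) = -1)]
        have hgetD : (l ++ [')']).getD ((l.length : Int)).toNat ' ' = ')' := by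
          simp [Int.toNat_natCast, List.getD_eq_getElem?_getD]
        rw [hgetD, if_pos rfl]
      · rw [if_neg h1, if_neg h1, if_neg h2, if_neg h2, ih]
        by_cases hk1 : max (pvRfind l '(') (pvRfind l ')') = -1
        · rw [if_pos hk1, if_pos hk1]
        · rw [if_neg hk1, if_neg hk1]
          have hk0 : 0 ≤ max (pvRfind l '(') (pvRfind l ')') := by
            rcases max_choice (pvRfind l '(') (pvRfind l ')') with h | h <;> rw [h] <;>
              rw [h] at hk1 <;> omega
          have hklt : max (pvRfind l '(') (pvRfind l ')') < (l.length : Int) := max_lt hlt1 hlt2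
          have hgetD : (l ++ [c]).getD (max (pvRfind l '(') (pvRfind l ')')).toNat ' '
              = l.getD (max (pvRfind l '(') (pvRfind l ')')).toNat ' ' := by
            have hlt : (max (pvRfind l '(') (pvRfind l ')')).toNat < l.length := by omega
            simp [List.getD_eq_getElem?_getD, List.getElem?_append_left hlt]
          rw [hgetD]

-- B's value in the same normal form
theorem B_eq (string : String) :
    get_start_index_of_quantity_unit_alt string =
      (if pvI string = 0 then -1
       else if pvKk string = -1 then (pvI string : Int)
       else if (pvSub string).getD (pvKk string).toNat ' ' = ')' then pvKk string + 1
       else pvKk string) := by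
  rw [get_start_index_of_quantity_unit_alt]
  rw [show PySem.Chars.strip string.toList ++ [' '] = pvS string from rfl]
  rw [scan_decomp (pvS string) 0 none (pvS_last string)]
  simp only [Nat.sub_zero]
  rw [show (pvS string).take (pvForA (pvS string) 0) = pvSub string from rfl]
  rw [show pvForA (pvS string) 0 = pvI string from rfl]
  rw [bound_eq_rfind]
  rw [show max (pvRfind (pvSub string) '(') (pvRfind (pvSub string) ')') = pvKk string from rfl]
  by_cases hi0 : pvI string = 0
  · rw [if_pos hi0, if_pos hi0]
  · rw [if_neg hi0, if_neg hi0]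
    by_cases hk1 : pvKk string = -1
    · rw [if_pos hk1, if_pos hk1]
    · rw [if_neg hk1, if_neg hk1]
      by_cases hpar : (pvSub string).getD (pvKk string).toNat ' ' = ')'
      · rw [if_pos hpar, if_pos hpar]
      · rw [if_neg hpar, if_neg hpar]

-- the maximal NUMERIC-prefix equals the scanned prefix, possibly plus the final padding space
theorem takeWhile_take (t : List Char) : ∀ (pos : Nat), t.getLast? = some ' ' →
    t.takeWhile (fun c => pvNumeric.contains c) = t.take (pvForA t pos - pos) ∨
    t.takeWhile (fun c => pvNumeric.contains c) = t.take (pvForA t pos - pos) ++ [' '] := by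
  induction t with
  | nil => intro pos h; simp at h
  | cons c rest ih =>
    intro pos hlast
    rw [List.takeWhile_cons, pvForA]
    by_cases hc : pvNumeric.contains c = true
    · rw [if_pos hc, if_pos hc]
      cases rest with
      | nil =>
        have hcsp : c = ' ' := by simpa using hlast
        right
        simp [pvForA, hcsp]
      | cons d tl =>
        have hlast' : (d :: tl).getLast? = some ' ' := by
          rwa [List.getLast?_cons_cons] at hlast
        have hge : pos + 1 ≤ pvForA (d :: tl) (pos + 1) := pvForA_ge _ _ (by simp)
        have htk : (c :: d :: tl).take (pvForA (d :: tl) (pos + 1) - pos)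
            = c :: (d :: tl).take (pvForA (d :: tl) (pos + 1) - (pos + 1)) := by
          have : pvForA (d :: tl) (pos + 1) - pos
              = (pvForA (d :: tl) (pos + 1) - (pos + 1)) + 1 := by omega
          rw [this, List.take_succ_cons]
        rw [htk]
        rcases ih (pos + 1) hlast' with h | h
        · left; rw [h]
        · right; rw [h]; rfl
    · rw [if_neg hc, if_neg hc]
      left
      simp

-- D_ in the normal form: prefix nonempty and the rightmost parenthesis is '(' at index 0
theorem getLast?_cons_ne {a : Char} {t : List Char} (h : t ≠ []) :
    (a :: t).getLast? = t.getLast? := by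
  cases t with
  | nil => exact absurd rfl h
  | cons d tl => rw [List.getLast?_cons_cons]

theorem D_iff (string : String) :
    D_get_start_index_of_quantity_unit string ↔
      (1 ≤ pvI string ∧ pvKk string = 0 ∧ (pvSub string).getD 0 ' ' = '(') := by
  rw [D_get_start_index_of_quantity_unit]
  rw [show PySem.Chars.strip string.toList ++ [' '] = pvS string from rfl]
  have hlast := pvS_last string
  constructor
  · rintro ⟨h1, h2⟩
    obtain ⟨t, hst⟩ : ∃ t, pvS string = '(' :: t := by
      cases hcs : pvS string with
      | nil => rw [hcs] at h1; simp at h1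
      | cons a l =>
        rw [hcs] at h1
        simp at h1
        exact ⟨l, by rw [h1]⟩
    have htne : t ≠ [] := by
      intro h0
      rw [hst, h0] at hlast
      simp at hlast
    have htlast : t.getLast? = some ' ' := by
      rw [hst, getLast?_cons_ne htne] at hlast
      exact hlast
    have hiF : pvI string = pvForA t 1 := by
      rw [pvI, hst, pvForA, if_pos (by decide)]
    have hge : 1 ≤ pvForA t 1 := pvForA_ge t 1 htne
    obtain ⟨m, hm⟩ : ∃ m, pvForA t 1 = m + 1 := ⟨pvForA t 1 - 1, by omega⟩
    have hm' : pvForA t 1 - 1 = m := by omega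
    have hsubeq : pvSub string = '(' :: t.take m := by
      rw [pvSub, hst, pvI, hst, pvForA, if_pos (by decide), hm, List.take_succ_cons]
    refine ⟨by omega, ?_, ?_⟩
    · have hst' : (pvS string).tail = t := by rw [hst, List.tail_cons]
      rw [hst'] at h2
      have hpf : ∀ c ∈ t.take m, c ≠ '(' ∧ c ≠ ')' := by
        intro c hc
        have hmem : c ∈ t.takeWhile (fun c => pvNumeric.contains c) := by
          rcases takeWhile_take t 1 htlast with h | h
          · rw [h, hm']; exact hc
          · rw [h, hm']; exact List.mem_append_left _ hc
        have := List.all_eq_true.mp h2 c hmem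
        simp at this
        exact ⟨this.1, this.2⟩
      have hr1 : pvRfind (t.take m) '(' = -1 :=
        (pvRfind_neg _ _).mpr (fun hmm => ((hpf _ hmm).1 rfl))
      have hr2 : pvRfind (t.take m) ')' = -1 :=
        (pvRfind_neg _ _).mpr (fun hmm => ((hpf _ hmm).2 rfl))
      rw [pvKk, hsubeq]
      simp [pvRfind, hr1, hr2]
    · rw [hsubeq]
      rfl
  · rintro ⟨hi1, hk0, hgd⟩
    have hsne := pvS_ne string
    obtain ⟨a, t, hst⟩ : ∃ a t, pvS string = a :: t := by
      cases hcs : pvS string with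
      | nil => exact absurd hcs hsne
      | cons a l => exact ⟨a, l, rfl⟩
    obtain ⟨m, hm⟩ : ∃ m, pvI string = m + 1 := ⟨pvI string - 1, by omega⟩
    have hsubeq : pvSub string = a :: t.take m := by
      rw [pvSub, hst, hm, List.take_succ_cons]
    have ha : a = '(' := by
      rw [hsubeq] at hgd
      simpa using hgd
    rw [pvKk, hsubeq, ha] at hk0
    have hg1 := pvRfind_ge (t.take m) '('
    have hg2 := pvRfind_ge (t.take m) ')'
    -- rightmost ')' cannot be 0 (the head is '('), hence there is none at all
    have hr2' : pvRfind ('(' :: t.take m) ')' = -1 := by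
      by_contra hne
      have hgd2 := pvRfind_getD ('(' :: t.take m) ')' hne
      have hle : pvRfind ('(' :: t.take m) ')' ≤ 0 :=
        le_of_max_le_right (le_of_eq hk0)
      have hge0 : 0 ≤ pvRfind ('(' :: t.take m) ')' := by
        have := pvRfind_ge ('(' :: t.take m) ')'
        omega
      have h0 : pvRfind ('(' :: t.take m) ')' = 0 := le_antisymm hle hge0
      rw [h0] at hgd2
      simp at hgd2
    have hr1' : pvRfind (t.take m) '(' = -1 := by
      by_contra hne
      have hstep : pvRfind ('(' :: t.take m) '('
          = pvRfind (t.take m) '(' + 1 := by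
        rw [pvRfind, if_pos hne]
      have hle : pvRfind ('(' :: t.take m) '(' ≤ 0 :=
        le_of_max_le_left (le_of_eq hk0)
      omega
    have hr2u : pvRfind (t.take m) ')' = -1 := by
      rw [pvRfind] at hr2'
      by_cases h : pvRfind (t.take m) ')' ≠ -1
      · rw [if_pos h] at hr2'; omega
      · simpa using h
    have hnp1 : '(' ∉ t.take m := (pvRfind_neg _ '(').mp hr1'
    have hnp2 : ')' ∉ t.take m := (pvRfind_neg _ ')').mp hr2u
    constructor
    · rw [hst, ha]; rfl
    · have hst' : (pvS string).tail = t := by rw [hst, List.tail_cons]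
      rw [hst']
      have htne : t ≠ [] := by
        intro h0
        have hlen := pvForA_le (pvS string) 0 hsne
        rw [hst, h0] at hlen
        simp at hlen
        have hIa : pvI string = pvForA [a] 0 := by rw [pvI, hst, h0]
        omega
      have htlast : t.getLast? = some ' ' := by
        rw [hst, getLast?_cons_ne htne] at hlast
        exact hlast
      have hiF : pvI string = pvForA t 1 := by
        rw [pvI, hst, ha, pvForA, if_pos (by decide)]
      have hm2 : pvForA t 1 - 1 = m := by omega
      rw [List.all_eq_true]
      intro c hcmem
      have hcu : c ∈ t.take m ∨ c = ' ' := by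
        rcases takeWhile_take t 1 htlast with h | h
        · left; rw [h, hm2] at hcmem; exact hcmem
        · rw [h, hm2] at hcmem
          rcases List.mem_append.mp hcmem with hmem1 | hmem2
          · left; exact hmem1
          · right; simpa using hmem2
      rcases hcu with h | h
      · simp only [Bool.and_eq_true, Bool.not_eq_true']
        constructor
        · by_contra hcc
          simp at hcc
          rw [hcc] at h
          exact hnp1 h
        · by_contra hcc
          simp at hcc
          rw [hcc] at h
          exact hnp2 h
      · rw [h]; decide

-- ===== VERDICT (by name: the statements are the Claim_ definitions above) =====
theorem get_start_index_of_quantity_unit_spec : Claim_unchanged_get_start_index_of_quantity_unit := by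
  intro string _ hnD
  rw [A_eq, B_eq]
  by_cases hi0 : pvI string = 0
  · have hsub0 : pvSub string = [] := by
      have := pvSub_len string
      rw [hi0] at this
      exact List.eq_nil_of_length_eq_zero this
    have hkm : pvKk string = -1 := by rw [pvKk, hsub0]; rfl
    rw [if_pos hkm, if_pos hi0, if_pos hi0]
  · rw [if_neg hi0]
    by_cases hk1 : pvKk string = -1
    · rw [if_pos hk1, if_pos hk1, if_neg hi0]
    · rw [if_neg hk1, if_neg hk1]
      by_cases hpar : (pvSub string).getD (pvKk string).toNat ' ' = ')'
      · rw [if_pos hpar, if_pos hpar, if_neg hi0]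
      · rw [if_neg hpar, if_neg hpar]
        by_cases hkz : pvKk string = 0
        · exfalso
          apply hnD
          rw [D_iff]
          refine ⟨?_, hkz, ?_⟩
          · by_contra hno
            have hi00 : pvI string = 0 := by omega
            exact hi0 hi00
          · -- the char at k = 0 is a parenthesis and, not being ')', is '('
            have hor : pvRfind (pvSub string) '(' = pvKk string ∨
                pvRfind (pvSub string) ')' = pvKk string := by
              rcases max_choice (pvRfind (pvSub string) '(') (pvRfind (pvSub string) ')')
                with h | h
              · left; rw [pvKk, h]
              · right; rw [pvKk, h]
            rcases hor with h | h
            · have := pvRfind_getD (pvSub string) '(' (by rw [h]; omega)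
              rw [h, hkz] at this
              simpa using this
            · exfalso
              have := pvRfind_getD (pvSub string) ')' (by rw [h]; omega)
              rw [h] at this
              exact hpar this
        · rw [if_neg hkz, if_neg hi0]

theorem get_start_index_of_quantity_unit_changed : Claim_changed_get_start_index_of_quantity_unit := by
  unfold Claim_changed_get_start_index_of_quantity_unit
  refine ⟨by decide, by decide, ?_, by decide, by decide⟩
  rw [A_eq]
  decide

theorem get_start_index_of_quantity_unit_tight : Claim_exact_get_start_index_of_quantity_unit := by
  intro string _ hD
  rw [D_iff] at hD
  obtain ⟨hi1, hk0, hgd⟩ := hD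
  rw [A_eq, B_eq]
  have hpar : ¬ (pvSub string).getD (pvKk string).toNat ' ' = ')' := by
    rw [hk0]
    simp only [Int.toNat_zero]
    rw [hgd]
    decide
  rw [if_neg (by omega : ¬ pvKk string = -1), if_neg hpar, if_pos hk0,
      if_neg (by omega : ¬ pvI string = 0), if_neg (by omega : ¬ pvKk string = -1),
      if_neg hpar, hk0]
  omega
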